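-- pv_equiv track=rewrite | github.com/PhiliptheGinger/cap-predictor | sentimental_cap_predictor/sentimental_cap_predictor/analyze_batch.py | find_peaks_and_valleys
-- ===== SOURCE A (Python) =====
-- def find_peaks_and_valleys(predictions, window=3):
--     peaks, valleys = [], []
--     for i in range(window, len(predictions) - window):
--         if predictions[i] > max(predictions[i - window:i]) and predictions[i] > max(predictions[i + 1:i + window + 1]):
--             peaks.append(i)
--         elif predictions[i] < min(predictions[i - window:i]) and predictions[i] < min(predictions[i + 1:i + window + 1]):
--             valleys.append(i)
--     return peaks, valleys
-- ===== SOURCE B (Python) =====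
-- def _scan(vals, comb, is_start):
--     # prefix combine restarted at block boundaries
--     out = []
--     for j, x in enumerate(vals):
--         out.append(x if is_start(j) else comb(out[-1], x))
--     return out
--
--
-- def find_peaks_and_valleys(predictions, window=3):
--     peaks, valleys = [], []
--     n = len(predictions)
--     if window < 1 or n < 2 * window + 1:
--         return peaks, valleys
--     w = window
--     rev = predictions[::-1]
--     pmax = _scan(predictions, max, lambda j: j % w == 0)
--     pmin = _scan(predictions, min, lambda j: j % w == 0)
--     smax = _scan(rev, max, lambda k: k == 0 or (n - 1 - k) % w == w - 1)[::-1]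
--     smin = _scan(rev, min, lambda k: k == 0 or (n - 1 - k) % w == w - 1)[::-1]
--     # any window of length w is suffix-of-block + prefix-of-block
--     for i in range(w, n - w):
--         x = predictions[i]
--         if x > smax[i - w] and x > pmax[i - 1] and x > smax[i + 1] and x > pmax[i + w]:
--             peaks.append(i)
--         elif x < smin[i - w] and x < pmin[i - 1] and x < smin[i + 1] and x < pmin[i + w]:
--             valleys.append(i)
--     return peaks, valleys
-- ===== Notes on version B (the rewrite author's own statement) =====
-- stated objective: alternative
-- what changed: Instead of recomputing max/min of four slices at every index, B precomputes block-aligned prefix and suffix extrema scans (block size = window) and answers each length-window window by combining one suffix-scan value and one prefix-scan value; measured running times are comparable.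
import Mathlib
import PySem

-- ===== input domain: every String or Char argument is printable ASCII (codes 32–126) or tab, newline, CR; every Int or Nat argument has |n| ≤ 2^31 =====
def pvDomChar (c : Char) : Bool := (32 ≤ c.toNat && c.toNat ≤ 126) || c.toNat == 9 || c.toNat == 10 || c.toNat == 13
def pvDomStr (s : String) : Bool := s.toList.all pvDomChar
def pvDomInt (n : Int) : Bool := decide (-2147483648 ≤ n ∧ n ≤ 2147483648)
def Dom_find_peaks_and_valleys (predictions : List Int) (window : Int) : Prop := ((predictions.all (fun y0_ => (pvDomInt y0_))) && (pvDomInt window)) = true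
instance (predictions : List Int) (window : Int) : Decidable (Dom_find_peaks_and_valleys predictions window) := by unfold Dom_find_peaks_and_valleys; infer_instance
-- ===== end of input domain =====

-- B replaces A's per-index max/min over slices by block prefix/suffix extrema scans (same results; alternative algorithm, no speed claim).

-- ===== PORT A =====
def find_peaks_and_valleys (predictions : List Int) (window : Int) : List Int × List Int :=
  (PySem.List.pyRange window (PySem.List.len predictions - window) 1).foldl
    (fun pv i =>
      if (PySem.List.pyGetD predictions i 0 > (PySem.List.max? (PySem.List.slice predictions (some (i - window)) (some i)) (fun y => y)).getD 0
          ∧ PySem.List.pyGetD predictions i 0 > (PySem.List.max? (PySem.List.slice predictions (some (i + 1)) (some (i + window + 1))) (fun y => y)).getD 0)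
      then (pv.1 ++ [i], pv.2)
      else if (PySem.List.pyGetD predictions i 0 < (PySem.List.min? (PySem.List.slice predictions (some (i - window)) (some i)) (fun y => y)).getD 0
          ∧ PySem.List.pyGetD predictions i 0 < (PySem.List.min? (PySem.List.slice predictions (some (i + 1)) (some (i + window + 1))) (fun y => y)).getD 0)
      then (pv.1, pv.2 ++ [i])
      else pv)
    ([], [])

-- ===== PORT B =====
-- port of Source B's _scan: prefix combine restarted at block boundaries (out.append / out[-1] kept literal)
def pvScan (vals : List Int) (comb : Int → Int → Int) (isStart : Int → Bool) : List Int :=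
  (PySem.List.enumerate vals 0).foldl
    (fun out jx => out ++ [if isStart jx.1 then jx.2 else comb (PySem.List.pyGetD out (-1) 0) jx.2]) []

def find_peaks_and_valleys_alt (predictions : List Int) (window : Int) : List Int × List Int :=
  let n : Int := PySem.List.len predictions
  if window < 1 ∨ n < 2 * window + 1 then ([], [])
  else
    let w := window
    let rev := (PySem.List.slice? predictions none none (-1)).getD []
    let isS : Int → Bool := fun j => PySem.Int.mod j w == 0
    let isSR : Int → Bool := fun k => k == 0 || PySem.Int.mod (n - 1 - k) w == w - 1
    let pmax := pvScan predictions (fun a b => max a b) isS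
    let pmin := pvScan predictions (fun a b => min a b) isS
    let smax := (PySem.List.slice? (pvScan rev (fun a b => max a b) isSR) none none (-1)).getD []
    let smin := (PySem.List.slice? (pvScan rev (fun a b => min a b) isSR) none none (-1)).getD []
    (PySem.List.pyRange w (n - w) 1).foldl
      (fun pv i =>
        let x := PySem.List.pyGetD predictions i 0
        if (x > PySem.List.pyGetD smax (i - w) 0 ∧ x > PySem.List.pyGetD pmax (i - 1) 0
            ∧ x > PySem.List.pyGetD smax (i + 1) 0 ∧ x > PySem.List.pyGetD pmax (i + w) 0)
        then (pv.1 ++ [i], pv.2)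
        else if (x < PySem.List.pyGetD smin (i - w) 0 ∧ x < PySem.List.pyGetD pmin (i - 1) 0
            ∧ x < PySem.List.pyGetD smin (i + 1) 0 ∧ x < PySem.List.pyGetD pmin (i + w) 0)
        then (pv.1, pv.2 ++ [i])
        else pv)
      ([], [])

-- ===== PRECONDITION & SPEC =====
-- Pre_ = exactly the inputs on which A returns: window ≥ 1, or the degenerate (window = 0, empty list);
-- for any other window A raises ValueError (max/min of an empty slice) or IndexError.
def Pre_find_peaks_and_valleys (predictions : List Int) (window : Int) : Prop :=
  1 ≤ window ∨ (window = 0 ∧ predictions = [])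
instance (predictions : List Int) (window : Int) : Decidable (Pre_find_peaks_and_valleys predictions window) := by
  unfold Pre_find_peaks_and_valleys; infer_instance
def pvWitness_find_peaks_and_valleys : List Int × Int := ([0, 0, 0, 5, 0, 0, 0], 3)

def Spec_find_peaks_and_valleys (predictions : List Int) (window : Int) (out : List Int × List Int) : Prop := out = find_peaks_and_valleys_alt predictions window
instance (predictions : List Int) (window : Int) (out : List Int × List Int) : Decidable (Spec_find_peaks_and_valleys predictions window out) := by unfold Spec_find_peaks_and_valleys; infer_instance

-- ===== CLAIM (what is proved, stated in full; the proofs are below) =====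
def Claim_equal_find_peaks_and_valleys : Prop := ∀ (predictions : List Int) (window : Int), Dom_find_peaks_and_valleys predictions window → Pre_find_peaks_and_valleys predictions window → Spec_find_peaks_and_valleys predictions window (find_peaks_and_valleys predictions window)

-- ===== LEMMAS AND PROOFS =====

-- segment combine: seg comb p l r = comb of p.getD l 0 .. p.getD r 0 (for l ≤ r)
def seg (comb : Int → Int → Int) (p : List Int) (l : Nat) : Nat → Int
  | 0 => p.getD l 0
  | r + 1 => if r + 1 ≤ l then p.getD l 0 else comb (seg comb p l r) (p.getD (r + 1) 0)

-- most recent block start ≤ j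
def startIdx (isStart : Int → Bool) : Nat → Nat
  | 0 => 0
  | j + 1 => if isStart ((j : Int) + 1) then j + 1 else startIdx isStart j

lemma seg_congr (comb : Int → Int → Int) (p q : List Int) (l r : Nat)
    (h : ∀ t, t ≤ max l r → p.getD t 0 = q.getD t 0) :
    seg comb p l r = seg comb q l r := by
  induction r with
  | zero => simp only [seg]; exact h l (by omega)
  | succ r ih =>
    simp only [seg]
    by_cases hl : r + 1 ≤ l
    · rw [if_pos hl, if_pos hl, h l (by omega)]
    · rw [if_neg hl, if_neg hl, h (r+1) (by omega), ih (fun t ht => h t (by omega))]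

lemma seg_pred (comb : Int → Int → Int) (Q : Int → Prop)
    (hQ : ∀ a b, Q (comb a b) ↔ Q a ∧ Q b) (p : List Int) (l r : Nat) (hlr : l ≤ r) :
    Q (seg comb p l r) ↔ ∀ j, l ≤ j → j ≤ r → Q (p.getD j 0) := by
  induction r with
  | zero =>
    have : l = 0 := by omega
    subst this
    simp only [seg]
    constructor
    · intro h j h1 h2
      have hj : j = 0 := by omega
      subst hj; exact h
    · intro h; exact h 0 (by omega) (by omega)
  | succ r ih =>
    by_cases hl : r + 1 ≤ l
    · have : l = r + 1 := by omega
      subst this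
      simp only [seg, if_pos hl]
      constructor
      · intro h j h1 h2
        have : j = r + 1 := by omega
        subst this; exact h
      · intro h; exact h (r+1) (by omega) (by omega)
    · have hlr' : l ≤ r := by omega
      simp only [seg, if_neg hl, hQ, ih hlr']
      constructor
      · rintro ⟨h1, h2⟩ j hj1 hj2
        rcases Nat.lt_or_ge j (r+1) with h | h
        · exact h1 j hj1 (by omega)
        · have : j = r + 1 := by omega
          subst this; exact h2
      · intro h
        exact ⟨fun j hj1 hj2 => h j hj1 (by omega), h (r+1) (by omega) (by omega)⟩

lemma startIdx_le (f : Int → Bool) (j : Nat) : startIdx f j ≤ j := by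
  induction j with
  | zero => exact Nat.le_of_eq rfl
  | succ j ih => simp only [startIdx]; split <;> omega

lemma startIdx_eq (f : Int → Bool) (j c : Nat) (hc : c ≤ j)
    (h1 : f (c : Int) = true ∨ c = 0)
    (h2 : ∀ t, c < t → t ≤ j → f (t : Int) = false) :
    startIdx f j = c := by
  induction j with
  | zero =>
    have : c = 0 := by omega
    subst this; rfl
  | succ j ih =>
    simp only [startIdx]
    by_cases hf : f ((j : Int) + 1) = true
    · rw [if_pos hf]
      by_contra hne
      have hcj : c < j + 1 := by omega
      have := h2 (j+1) (by omega) (by omega)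
      rw [show ((j+1 : Nat) : Int) = (j : Int) + 1 by push_cast; ring] at this
      rw [hf] at this; exact absurd this (by simp)
    · rw [if_neg hf]
      have hcj : c ≤ j := by
        rcases Nat.lt_or_ge c (j+1) with h | h
        · omega
        · have hcje : c = j + 1 := by omega
          subst hcje
          rcases h1 with h1 | h1
          · rw [show ((j+1 : Nat) : Int) = (j : Int) + 1 by push_cast; ring] at h1
            exact absurd h1 hf
          · omega
      exact ih hcj (fun t ht1 ht2 => h2 t ht1 (by omega))

lemma getD_append_self (xs : List Int) (x : Int) : (xs ++ [x]).getD xs.length 0 = 0 + x := by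
  simp [List.getD]

lemma pvScan_snoc (xs : List Int) (x : Int) (comb : Int → Int → Int) (f : Int → Bool) :
    pvScan (xs ++ [x]) comb f
      = pvScan xs comb f
        ++ [if f (xs.length : Int) then x else comb (PySem.List.pyGetD (pvScan xs comb f) (-1) 0) x] := by
  unfold pvScan
  rw [PySem.List.enumerate_append, List.foldl_append]
  simp [PySem.List.enumerate_cons, PySem.List.enumerate_nil]

lemma pvScan_length (vals : List Int) (comb : Int → Int → Int) (f : Int → Bool) :
    (pvScan vals comb f).length = vals.length := by
  induction vals using List.reverseRecOn with
  | nil => rfl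
  | append_singleton xs x ih => rw [pvScan_snoc]; simp [ih]

lemma pvScan_getD (vals : List Int) (comb : Int → Int → Int) (f : Int → Bool)
    (h0 : f 0 = true) (j : Nat) (hj : j < vals.length) :
    (pvScan vals comb f).getD j 0 = seg comb vals (startIdx f j) j := by
  induction vals using List.reverseRecOn generalizing j with
  | nil => simp at hj
  | append_singleton xs x ih =>
    rw [pvScan_snoc]
    rcases Nat.lt_or_ge j xs.length with hlt | hge
    · rw [List.getD_append _ _ _ _ (by rw [pvScan_length]; exact hlt)]
      rw [ih j hlt]
      apply seg_congr
      intro t ht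
      have htl : t < xs.length := by have := startIdx_le f j; omega
      rw [List.getD_append _ _ _ _ htl]
    · have hj' : j = xs.length := by simp [List.length_append] at hj; omega
      subst hj'
      have hlen : (pvScan xs comb f).length = xs.length := pvScan_length xs comb f
      rw [show (pvScan xs comb f
          ++ [if f (xs.length : Int) then x else comb (PySem.List.pyGetD (pvScan xs comb f) (-1) 0) x]).getD xs.length 0
          = (if f (xs.length : Int) then x else comb (PySem.List.pyGetD (pvScan xs comb f) (-1) 0) x) from by
        rw [← hlen]
        rw [getD_append_self]
        ring]
      by_cases hf : f (xs.length : Int) = true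
      · rw [if_pos hf]
        have hsi : startIdx f xs.length = xs.length := by
          cases hxs : xs.length with
          | zero => rfl
          | succ m =>
            show startIdx f (m + 1) = m + 1
            simp only [startIdx]
            rw [if_pos (by rw [show ((m : Int) + 1) = ((m + 1 : Nat) : Int) by push_cast; ring, ← hxs]; exact hf)]
        rw [hsi]
        cases hxs : xs.length with
        | zero =>
          have hxe : xs = [] := List.length_eq_zero_iff.1 hxs
          subst hxe; simp [seg]
        | succ m =>
          symm
          show seg comb (xs ++ [x]) (m + 1) (m + 1) = x
          simp only [seg, if_pos (le_refl (m+1))]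
          rw [show m + 1 = xs.length from hxs.symm]
          simp
      · rw [if_neg hf]
        have hpos : 1 ≤ xs.length := by
          by_contra hc
          have : xs.length = 0 := by omega
          rw [this] at hf
          exact hf (by exact_mod_cast h0)
        obtain ⟨m, hxs⟩ : ∃ m, xs.length = m + 1 := ⟨xs.length - 1, by omega⟩
        have hne : pvScan xs comb f ≠ [] := by
          intro hc; rw [hc] at hlen; simp at hlen; omega
        rw [PySem.List.pyGetD_neg_one _ _ hne, List.getLast_eq_getElem]
        have hgd : (pvScan xs comb f)[(pvScan xs comb f).length - 1]'(by omega) 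
            = (pvScan xs comb f).getD m 0 := by
          rw [List.getD_eq_getElem _ _ (by omega)]
          congr 1; omega
        rw [hgd, ih m (by omega)]
        have hsi : startIdx f xs.length = startIdx f m := by
          rw [hxs]
          show startIdx f (m + 1) = startIdx f m
          simp only [startIdx]
          rw [if_neg (by rw [show ((m : Int) + 1) = ((m + 1 : Nat) : Int) by push_cast; ring, ← hxs]; exact hf)]
        rw [hsi, hxs]
        have hsle : startIdx f m ≤ m := startIdx_le f m
        symm
        show seg comb (xs ++ [x]) (startIdx f m) (m + 1) = _
        simp only [seg, if_neg (by omega : ¬ (m + 1 ≤ startIdx f m))]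
        congr 1
        · apply (seg_congr _ _ _ _ _ _).symm
          intro t ht
          have htl : t < xs.length := by omega
          rw [List.getD_append _ _ _ _ htl]
        · rw [show m + 1 = xs.length from hxs.symm]
          simp

-- the window-cover arithmetic: a window [l, l+w-1] is the block suffix [l, E] plus the block prefix [S, l+w-1]
lemma window_cover (Q : Nat → Prop) (w l r : Nat) (hw : 1 ≤ w) (hr : r = l + w - 1) :
    ((∀ j, l ≤ j → j ≤ l + (w - 1 - l % w) → Q j) ∧ (∀ j, w * (r / w) ≤ j → j ≤ r → Q j)) ↔
    (∀ j, l ≤ j → j ≤ r → Q j) := by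
  have hm := Nat.div_add_mod l w
  have hmw : l % w < w := Nat.mod_lt _ (by omega)
  by_cases hm0 : l % w = 0
  · have h1 : (w - 1) / w = 0 := Nat.div_eq_of_lt (by omega)
    have hdiv : r / w = l / w := by
      rw [show r = w * (l / w) + (w - 1) by omega, Nat.mul_add_div (show 0 < w by omega), h1]
      omega
    have hS : w * (r / w) = l := by rw [hdiv]; omega
    constructor
    · rintro ⟨h1, _⟩ j hj1 hj2; exact h1 j hj1 (by omega)
    · intro h; exact ⟨fun j a b => h j a (by omega), fun j a b => h j (by omega) b⟩
  · have hexp : w * (l / w + 1) = w * (l / w) + w := by ring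
    have h1 : (l % w - 1) / w = 0 := Nat.div_eq_of_lt (by omega)
    have hdiv : r / w = l / w + 1 := by
      rw [show r = w * (l / w + 1) + (l % w - 1) by omega, Nat.mul_add_div (show 0 < w by omega), h1]
    have hS : w * (r / w) = l + (w - l % w) := by rw [hdiv]; omega
    constructor
    · rintro ⟨h1, h2⟩ j hj1 hj2
      by_cases hc : j ≤ l + (w - 1 - l % w)
      · exact h1 j hj1 hc
      · exact h2 j (by omega) hj2
    · intro h; exact ⟨fun j a b => h j a (by omega), fun j a b => h j (by omega) b⟩

lemma max?_getD_lt (s : List Int) (hs : s ≠ []) (x : Int) :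
    ((PySem.List.max? s (fun y => y)).getD 0 < x) ↔ ∀ y ∈ s, y < x := by
  cases hm : PySem.List.max? s (fun y => y) with
  | none => exact absurd ((PySem.List.max?_eq_none_iff s _).1 hm) hs
  | some m =>
    simp only [Option.getD_some]
    constructor
    · intro h y hy
      exact lt_of_le_of_lt (PySem.List.max?_isMax hm y hy) h
    · intro h
      exact h m (PySem.List.max?_mem hm)

lemma lt_min?_getD (s : List Int) (hs : s ≠ []) (x : Int) :
    (x < (PySem.List.min? s (fun y => y)).getD 0) ↔ ∀ y ∈ s, x < y := by
  cases hm : PySem.List.min? s (fun y => y) with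
  | none => exact absurd ((PySem.List.min?_eq_none_iff s _).1 hm) hs
  | some m =>
    simp only [Option.getD_some]
    constructor
    · intro h y hy
      exact lt_of_lt_of_le h (PySem.List.min?_isMin hm y hy)
    · intro h
      exact h m (PySem.List.min?_mem hm)

lemma forall_mem_drop_take (p : List Int) (a c : Nat) (Q : Int → Prop) :
    (∀ y ∈ (p.drop a).take c, Q y) ↔
    (∀ j, a ≤ j → j < a + c → j < p.length → Q (p.getD j 0)) := by
  constructor
  · intro h j h1 h2 h3
    have hj' : j - a < ((p.drop a).take c).length := by
      simp only [List.length_take, List.length_drop]; omega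
    have he : ((p.drop a).take c)[j - a]'hj' = p.getD j 0 := by
      rw [List.getElem_take, List.getElem_drop, List.getD_eq_getElem _ _ (by omega)]
      congr 1; omega
    exact he ▸ h _ (List.getElem_mem hj')
  · intro h y hy
    obtain ⟨t, ht, rfl⟩ := List.mem_iff_getElem.1 hy
    have htb : t < c ∧ a + t < p.length := by
      simp only [List.length_take, List.length_drop] at ht; omega
    rw [List.getElem_take, List.getElem_drop]
    have := h (a + t) (by omega) (by omega) (by omega)
    rwa [List.getD_eq_getElem _ _ (by omega)] at this

lemma getD_reverse (p : List Int) (t : Nat) (ht : t < p.length) :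
    p.reverse.getD t 0 = p.getD (p.length - 1 - t) 0 := by
  rw [List.getD_eq_getElem _ _ (by simpa using ht), List.getElem_reverse,
    List.getD_eq_getElem _ _ (by omega)]

lemma startIdx_isS (w r : Nat) (hw : 1 ≤ w) :
    startIdx (fun j => PySem.Int.mod j (w : Int) == 0) r = w * (r / w) := by
  have hdm := Nat.div_add_mod r w
  have hmw : r % w < w := Nat.mod_lt _ (by omega)
  apply startIdx_eq
  · omega
  · left
    rw [show ((w * (r / w) : Nat) : Int) = ((w * (r / w) : Nat) : Int) from rfl, PySem.Int.mod_natCast]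
    simp [Nat.mul_mod_right]
  · intro t ht1 ht2
    rw [PySem.Int.mod_natCast]
    have : t % w = t - w * (r / w) := by
      conv_lhs => rw [show t = w * (r / w) + (t - w * (r / w)) by omega]
      rw [Nat.mul_add_mod, Nat.mod_eq_of_lt (by omega)]
    simp only [beq_eq_false_iff_ne, ne_eq]
    intro hc
    have : t % w = 0 := by exact_mod_cast hc
    omega

lemma startIdx_isSR (w l n : Nat) (hw : 1 ≤ w) (hn : 1 ≤ n)
    (hE : l + (w - 1 - l % w) ≤ n - 1) :
    startIdx (fun k => k == 0 || PySem.Int.mod ((n : Int) - 1 - k) (w : Int) == (w : Int) - 1) (n - 1 - l)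
      = n - 1 - (l + (w - 1 - l % w)) := by
  have hdm := Nat.div_add_mod l w
  have hmw : l % w < w := Nat.mod_lt _ (by omega)
  set E := l + (w - 1 - l % w) with hEdef
  have hEmod : E % w = w - 1 := by
    conv_lhs => rw [show E = w * (l / w) + (w - 1) by omega]
    rw [Nat.mul_add_mod, Nat.mod_eq_of_lt (by omega)]
  apply startIdx_eq
  · omega
  · left
    have hcast : (n : Int) - 1 - ((n - 1 - E : Nat) : Int) = ((E : Nat) : Int) := by
      push_cast [Nat.cast_sub (show E ≤ n - 1 by omega), Nat.cast_sub (show 1 ≤ n by omega)]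
      ring
    rw [hcast, PySem.Int.mod_natCast, hEmod]
    simp only [Bool.or_eq_true, beq_iff_eq]
    right
    push_cast [Nat.cast_sub hw]
    ring
  · intro t ht1 ht2
    have htn : t ≤ n - 1 := by omega
    have he1 : l ≤ n - 1 - t := by omega
    have he2 : n - 1 - t < E := by omega
    have hcast : (n : Int) - 1 - ((t : Nat) : Int) = ((n - 1 - t : Nat) : Int) := by
      push_cast [Nat.cast_sub htn, Nat.cast_sub (show 1 ≤ n by omega)]
      ring
    rw [hcast, PySem.Int.mod_natCast]
    have hemod : (n - 1 - t) % w = l % w + (n - 1 - t - l) := by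
      conv_lhs => rw [show n - 1 - t = w * (l / w) + (l % w + (n - 1 - t - l)) by omega]
      rw [Nat.mul_add_mod, Nat.mod_eq_of_lt (by omega)]
    simp only [Bool.or_eq_false_iff, beq_eq_false_iff_ne, ne_eq]
    constructor
    · intro hc
      have : t = 0 := by exact_mod_cast hc
      omega
    · intro hc
      rw [hemod] at hc
      have hc' : ((l % w + (n - 1 - t - l) : Nat) : Int) = ((w - 1 : Nat) : Int) := by
        rw [hc]; push_cast [Nat.cast_sub hw]; ring
      have : l % w + (n - 1 - t - l) = w - 1 := by exact_mod_cast hc'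
      omega

lemma amax_iff (p : List Int) (a b : Nat) (x : Int) (hab : a < b) (hbn : b ≤ p.length) :
    ((PySem.List.max? (PySem.List.slice p (some (a : Int)) (some (b : Int))) (fun y => y)).getD 0 < x)
    ↔ (∀ j, a ≤ j → j ≤ b - 1 → p.getD j 0 < x) := by
  rw [PySem.List.slice_natCast]
  have hne : (List.take (b - a) (List.drop a p)) ≠ [] := by
    apply List.ne_nil_of_length_pos
    simp only [List.length_take, List.length_drop]
    omega
  rw [max?_getD_lt _ hne x, forall_mem_drop_take p a (b - a) (fun y => y < x)]
  constructor
  · intro h j h1 h2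
    exact h j h1 (by omega) (by omega)
  · intro h j h1 h2 h3
    exact h j h1 (by omega)

lemma amin_iff (p : List Int) (a b : Nat) (x : Int) (hab : a < b) (hbn : b ≤ p.length) :
    (x < (PySem.List.min? (PySem.List.slice p (some (a : Int)) (some (b : Int))) (fun y => y)).getD 0)
    ↔ (∀ j, a ≤ j → j ≤ b - 1 → x < p.getD j 0) := by
  rw [PySem.List.slice_natCast]
  have hne : (List.take (b - a) (List.drop a p)) ≠ [] := by
    apply List.ne_nil_of_length_pos
    simp only [List.length_take, List.length_drop]
    omega
  rw [lt_min?_getD _ hne x, forall_mem_drop_take p a (b - a) (fun y => x < y)]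
  constructor
  · intro h j h1 h2
    exact h j h1 (by omega) (by omega)
  · intro h j h1 h2 h3
    exact h j h1 (by omega)

lemma bscan_iff (p : List Int) (w : Int) (wn l r : Nat) (comb : Int → Int → Int)
    (Q : Int → Prop) (hQ : ∀ a b, Q (comb a b) ↔ Q a ∧ Q b)
    (hwI : w = (wn : Int)) (hw1 : 1 ≤ wn) (hr : r = l + wn - 1) (hrn : r < p.length) :
    (Q (PySem.List.pyGetD ((PySem.List.slice? (pvScan ((PySem.List.slice? p none none (-1)).getD [])
          comb
          (fun k => k == 0 || PySem.Int.mod ((p.length : Int) - 1 - k) w == w - 1)) none none (-1)).getD []) ((l : Nat) : Int) 0)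
     ∧ Q (PySem.List.pyGetD (pvScan p comb (fun j => PySem.Int.mod j w == 0)) ((r : Nat) : Int) 0))
    ↔ (∀ j, l ≤ j → j ≤ r → Q (p.getD j 0)) := by
  subst hwI
  set n := p.length with hn
  have hln : 1 ≤ n := by omega
  have hE : l + (wn - 1 - l % wn) ≤ n - 1 := by
    have hmle : wn - 1 - l % wn ≤ wn - 1 := by omega
    omega
  simp only [PySem.List.slice?_none_none_neg_one, Option.getD_some,
    PySem.List.pyGetD_natCast]
  have hm0 : PySem.Int.mod 0 ((wn : Nat) : Int) = 0 := by
    simpa using PySem.Int.mod_natCast 0 wn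
  have hlev : (pvScan p.reverse comb
      (fun k => k == 0 || PySem.Int.mod ((n : Int) - 1 - k) ((wn : Nat) : Int) == ((wn : Nat) : Int) - 1)).length = n := by
    rw [pvScan_length, List.length_reverse]
  rw [show (pvScan p.reverse comb
        (fun k => k == 0 || PySem.Int.mod ((n : Int) - 1 - k) ((wn : Nat) : Int) == ((wn : Nat) : Int) - 1)).reverse.getD l 0
      = (pvScan p.reverse comb
        (fun k => k == 0 || PySem.Int.mod ((n : Int) - 1 - k) ((wn : Nat) : Int) == ((wn : Nat) : Int) - 1)).getD (n - 1 - l) 0 from by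
    have hg := getD_reverse (pvScan p.reverse comb
        (fun k => k == 0 || PySem.Int.mod ((n : Int) - 1 - k) ((wn : Nat) : Int) == ((wn : Nat) : Int) - 1)) l (by rw [hlev]; omega)
    rwa [hlev] at hg]
  rw [pvScan_getD _ _ _ (by simp) (n - 1 - l) (by rw [List.length_reverse]; omega)]
  rw [pvScan_getD _ _ _ (by simp [hm0]) r (by omega)]
  rw [startIdx_isSR wn l n hw1 hln hE, startIdx_isS wn r hw1]
  have hS : wn * (r / wn) ≤ r := by
    rw [Nat.mul_comm]
    exact Nat.div_mul_le_self r wn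
  rw [seg_pred comb Q hQ p.reverse _ _ (by omega), seg_pred comb Q hQ p _ _ hS]
  have hrev : (∀ t, n - 1 - (l + (wn - 1 - l % wn)) ≤ t → t ≤ n - 1 - l → Q (p.reverse.getD t 0))
      ↔ (∀ e, l ≤ e → e ≤ l + (wn - 1 - l % wn) → Q (p.getD e 0)) := by
    constructor
    · intro h e he1 he2
      have ht := h (n - 1 - e) (by omega) (by omega)
      rwa [getD_reverse p (n - 1 - e) (by omega), show n - 1 - (n - 1 - e) = e by omega] at ht
    · intro h t ht1 ht2
      rw [getD_reverse p t (by omega)]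
      exact h (n - 1 - t) (by omega) (by omega)
  rw [hrev]
  exact window_cover (fun j => Q (p.getD j 0)) wn l r hw1 hr

-- ===== VERDICT (by name: the statement is the Claim_ definition above) =====
theorem find_peaks_and_valleys_spec : Claim_equal_find_peaks_and_valleys := by
  intro p window hdom hpre
  unfold Spec_find_peaks_and_valleys find_peaks_and_valleys find_peaks_and_valleys_alt
  unfold Pre_find_peaks_and_valleys at hpre
  simp only [PySem.List.len_eq]
  rcases hpre with hw | ⟨hw0, hpe⟩
  · by_cases hsmall : ((p.length : Nat) : Int) < 2 * window + 1
    · rw [if_pos (Or.inr hsmall)]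
      rw [PySem.List.pyRange_one_eq_nil (by omega)]
      rfl
    · rw [if_neg (by omega)]
      apply PySem.List.foldl_congr_mem
      intro acc i hi
      obtain ⟨hi1, hi2⟩ := PySem.List.mem_pyRange_one.1 hi
      obtain ⟨wn, rfl⟩ : ∃ wn : Nat, window = (wn : Int) :=
        ⟨window.toNat, (Int.toNat_of_nonneg (by omega)).symm⟩
      obtain ⟨k, rfl⟩ : ∃ k : Nat, i = (k : Int) :=
        ⟨i.toNat, (Int.toNat_of_nonneg (by omega)).symm⟩
      have hw1 : 1 ≤ wn := by exact_mod_cast hw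
      have hkw : wn ≤ k := by exact_mod_cast hi1
      have hkn : k + wn < p.length := by omega
      rw [show (k : Int) - (wn : Int) = ((k - wn : Nat) : Int) by omega,
        show (k : Int) - 1 = ((k - 1 : Nat) : Int) by omega,
        show (k : Int) + 1 = ((k + 1 : Nat) : Int) by push_cast; ring,
        show (k : Int) + (wn : Int) + 1 = ((k + wn + 1 : Nat) : Int) by push_cast; ring,
        show (k : Int) + (wn : Int) = ((k + wn : Nat) : Int) by push_cast; ring]
      simp only [gt_iff_lt]
      set x := PySem.List.pyGetD p ((k : Nat) : Int) 0 with hx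
      have ha1 := amax_iff p (k - wn) k x (by omega) (by omega)
      have ha2 := amax_iff p (k + 1) (k + wn + 1) x (by omega) (by omega)
      have hc1 := amin_iff p (k - wn) k x (by omega) (by omega)
      have hc2 := amin_iff p (k + 1) (k + wn + 1) x (by omega) (by omega)
      have hb1 := bscan_iff p ((wn : Nat) : Int) wn (k - wn) (k - 1) (fun a b => max a b)
        (fun y => y < x) (fun a b => max_lt_iff) rfl hw1 (by omega) (by omega)
      have hb2 := bscan_iff p ((wn : Nat) : Int) wn (k + 1) (k + wn) (fun a b => max a b)
        (fun y => y < x) (fun a b => max_lt_iff) rfl hw1 (by omega) (by omega)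
      have hd1 := bscan_iff p ((wn : Nat) : Int) wn (k - wn) (k - 1) (fun a b => min a b)
        (fun y => x < y) (fun a b => lt_min_iff) rfl hw1 (by omega) (by omega)
      have hd2 := bscan_iff p ((wn : Nat) : Int) wn (k + 1) (k + wn) (fun a b => min a b)
        (fun y => x < y) (fun a b => lt_min_iff) rfl hw1 (by omega) (by omega)
      have hred : k + wn + 1 - 1 = k + wn := rfl
      rw [hred] at ha2 hc2
      refine if_congr ?_ rfl (if_congr ?_ rfl rfl)
      · rw [ha1, ha2, ← and_assoc, hb1, hb2]
      · rw [hc1, hc2, ← and_assoc, hd1, hd2]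
  · subst hw0
    subst hpe
    rfl
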